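-- pv_equiv track=rewrite | github.com/Nikita5543/Test-SSO-01 | vision-v2/backend/app/scripts/bgp_prefixlist_updater.py | _parse_juniper_prefix_list
-- ===== SOURCE A (Python) =====
-- from typing import List, Dict, Optional, Tuple
--
-- def _parse_juniper_prefix_list(output: str) -> List[str]:
--     """
--     Parse Juniper format output and extract prefixes
--
--     Example output format:
--     policy-options {
--         prefix-list GOOGLE-PREFIXES {
--             8.8.4.0/24;
--             8.8.8.0/24;
--             ...
--         }
--     }
--     """
--     prefixes = []
--     lines = output.split('\n')
--
--     for line in lines:
--         line = line.strip()
--         # Look for lines ending with semicolon that contain prefixes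
--         if line.endswith(';') and ('/' in line):
--             # Remove semicolon and whitespace
--             prefix = line.rstrip(';').strip()
--             if prefix:
--                 prefixes.append(prefix)
--
--     return prefixes
-- ===== SOURCE B (Python) =====
-- from typing import List
--
-- # Single-pass streaming scanner: no split into a line list, no per-line
-- # strip/rstrip re-scans.  We walk the characters once, keeping for the
-- # current line the confirmed body (left-trimmed, ending in a "solid" char),
-- # the pending trailing run of whitespace/';' chars, and whether a '/' was
-- # seen; a newline decides the line from that state alone.
--
-- _WS = ' \t\r\x0b\x0c'   # line-internal whitespace (a line never contains '\n')
--
--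
-- def _parse_juniper_prefix_list(output: str) -> List[str]:
--     prefixes = []
--     body = ''      # confirmed part of the line (no leading whitespace; ends with a char that is neither whitespace nor ';')
--     pend = ''      # trailing run of whitespace/';' chars not yet known to be final
--     slash = False  # a '/' occurred in the current line
--     for ch in output + '\n':
--         if ch == '\n':
--             if slash:
--                 p2 = pend.rstrip(_WS)
--                 if p2.endswith(';'):
--                     prefixes.append(body + p2.rstrip(';').rstrip(_WS))
--             body, pend, slash = '', '', False
--         elif ch in _WS or ch == ';':
--             pend += ch
--         else:
--             if body:
--                 body += pend
--             else:
--                 body = pend.lstrip(_WS)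
--             body += ch
--             pend = ''
--             if ch == '/':
--                 slash = True
--     return prefixes
-- ===== Notes on version B (the rewrite author's own statement) =====
-- stated objective: alternative
-- what changed: Replaces A's split-into-a-line-list plus per-line strip/endswith/rstrip re-scans with a single forward pass over the characters: a small state machine (confirmed body, pending whitespace/';' run, slash flag) decides each line at its newline from the accumulated state alone, never materialising a line list.
import Mathlib
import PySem

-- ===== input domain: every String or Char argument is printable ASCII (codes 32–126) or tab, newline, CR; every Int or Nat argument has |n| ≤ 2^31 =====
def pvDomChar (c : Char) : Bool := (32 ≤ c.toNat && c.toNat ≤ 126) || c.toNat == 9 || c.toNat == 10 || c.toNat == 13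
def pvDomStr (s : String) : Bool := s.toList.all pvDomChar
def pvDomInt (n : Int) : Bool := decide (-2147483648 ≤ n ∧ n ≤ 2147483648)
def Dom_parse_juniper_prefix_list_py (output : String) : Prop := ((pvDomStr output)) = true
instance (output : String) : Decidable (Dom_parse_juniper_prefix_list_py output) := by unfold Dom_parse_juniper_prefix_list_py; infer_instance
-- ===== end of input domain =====

-- B replaces A's split-into-a-line-list plus per-line strip/rstrip re-scans by a single
-- forward character pass with a small per-line state (objective: alternative; same O(n) cost).

-- ===== PORT A =====
-- hand port of Python's s.rstrip(';') (exact: drops the maximal trailing run of ';')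
def pvRstripSemi (s : List Char) : List Char :=
  (s.reverse.dropWhile (· == ';')).reverse

def parse_juniper_prefix_list_py (output : String) : List String :=
  let lines := PySem.Chars.splitOn output.toList ['\n']
  (lines.foldl (fun (prefixes : List (List Char)) line =>
      let line := PySem.Chars.strip line
      if PySem.Chars.endswith line [';'] && PySem.Chars.isIn ['/'] line then
        let pfx := PySem.Chars.strip (pvRstripSemi line)
        if pfx ≠ [] then prefixes ++ [pfx] else prefixes
      else prefixes) []).map String.ofList

-- ===== PORT B =====
-- _WS = ' \t\r\x0b\x0c'  (line-internal whitespace; a line never contains '\n')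
def pvWS : List Char := [' ', '\t', '\r', Char.ofNat 11, Char.ofNat 12]
def pvIsWS (c : Char) : Bool := pvWS.contains c                                       -- ch in _WS
def pvLstripWS (s : List Char) : List Char := s.dropWhile pvIsWS                      -- s.lstrip(_WS)
def pvRstripWS (s : List Char) : List Char := (s.reverse.dropWhile pvIsWS).reverse    -- s.rstrip(_WS)

structure PvState where
  body : List Char
  pend : List Char
  slash : Bool
  prefixes : List (List Char)
deriving Repr, DecidableEq

def pvStep (st : PvState) (ch : Char) : PvState :=
  if ch = '\n' then
    let prefixes :=
      if st.slash then
        let p2 := pvRstripWS st.pend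
        if PySem.Chars.endswith p2 [';'] then
          st.prefixes ++ [st.body ++ pvRstripWS (pvRstripSemi p2)]
        else st.prefixes
      else st.prefixes
    ⟨[], [], false, prefixes⟩
  else if pvIsWS ch || ch == ';' then
    { st with pend := st.pend ++ [ch] }
  else
    { body := (if st.body ≠ [] then st.body ++ st.pend else pvLstripWS st.pend) ++ [ch],
      pend := [], slash := st.slash || ch == '/', prefixes := st.prefixes }

def parse_juniper_prefix_list_py_alt (output : String) : List String :=
  (((output.toList ++ ['\n']).foldl pvStep ⟨[], [], false, []⟩).prefixes).map String.ofList

-- ===== PRECONDITION & SPEC =====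
def Spec_parse_juniper_prefix_list_py (output : String) (out : List String) : Prop := out = parse_juniper_prefix_list_py_alt output
instance (output : String) (out : List String) : Decidable (Spec_parse_juniper_prefix_list_py output out) := by unfold Spec_parse_juniper_prefix_list_py; infer_instance

-- ===== CLAIM (what is proved, stated in full; the proofs are below) =====
def Claim_equal_parse_juniper_prefix_list_py : Prop := ∀ (output : String), Dom_parse_juniper_prefix_list_py output → Spec_parse_juniper_prefix_list_py output (parse_juniper_prefix_list_py output)

-- ===== LEMMAS AND PROOFS =====

-- a char is "not normal" when B's scanner parks it in pend: whitespace or ';'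
def pvNN (c : Char) : Bool := pvIsWS c || c == ';'

-- what A appends to its accumulator for one raw line
def pvEmitA (line : List Char) : List (List Char) :=
  let s := PySem.Chars.strip line
  if PySem.Chars.endswith s [';'] && PySem.Chars.isIn ['/'] s then
    let pfx := PySem.Chars.strip (pvRstripSemi s)
    if pfx ≠ [] then [pfx] else []
  else []

-- B's scanner state after a '\n'-free chunk, in closed form
def pvBodyOf (cs : List Char) : List Char := pvLstripWS ((cs.reverse.dropWhile pvNN).reverse)
def pvPendOf (cs : List Char) : List Char := (cs.reverse.takeWhile pvNN).reverse

def pvLines : List Char → List (List Char)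
  | [] => [[]]
  | c :: rest =>
    if c = '\n' then [] :: pvLines rest
    else match pvLines rest with
      | [] => [[c]]
      | l :: ls => (c :: l) :: ls
def pvConsHead (cur : List Char) : List (List Char) → List (List Char)
  | [] => [cur]
  | l :: ls => (cur ++ l) :: ls

theorem pvLines_ne_nil (l : List Char) : pvLines l ≠ [] := by
  match l with
  | [] => simp [pvLines]
  | c :: rest =>
    simp only [pvLines]
    split
    · simp
    · split <;> simp

theorem pvGo_spec (fuel : Nat) (l : List Char) (cur : List Char) (acc : List (List Char))
    (h : l.length ≤ fuel) :
    PySem.Chars.splitOn.go ['\n'] fuel l cur acc = acc.reverse ++ pvConsHead cur.reverse (pvLines l) := by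
  induction fuel generalizing l cur acc with
  | zero =>
    have : l = [] := by cases l <;> simp_all
    subst this
    simp [PySem.Chars.splitOn.go.eq_1, pvLines, pvConsHead]
  | succ fuel ih =>
    match l with
    | [] =>
      rw [PySem.Chars.splitOn.go.eq_def]
      simp [pvLines, pvConsHead]
    | c :: rest =>
      rw [PySem.Chars.splitOn.go.eq_def]
      dsimp only
      have hpre : List.isPrefixOf ['\n'] (c :: rest) = ('\n' == c) := by
        rw [List.isPrefixOf]; simp
      by_cases hc : c = '\n'
      · subst hc
        rw [hpre, if_pos (by decide)]
        simp only [List.length_cons, List.length_nil, List.drop_succ_cons, List.drop_zero]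
        rw [ih rest [] _ (by simpa using h)]
        have : pvConsHead [] (pvLines rest) = pvLines rest := by
          cases hrl : pvLines rest with
          | nil => exact absurd hrl (pvLines_ne_nil rest)
          | cons a as => simp [pvConsHead]
        simp [pvLines, pvConsHead]
        cases hrl2 : pvLines rest with
        | nil => exact absurd hrl2 (pvLines_ne_nil rest)
        | cons a as => simp
      · rw [hpre, if_neg (by simp; intro hh; exact hc hh.symm)]
        rw [ih rest (c :: cur) acc (by simpa using Nat.le_of_succ_le_succ (by simpa using h))]
        congr 1
        simp only [pvLines, if_neg hc]
        cases hrl : pvLines rest with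
        | nil => exact absurd hrl (pvLines_ne_nil rest)
        | cons a as => simp [pvConsHead]

theorem splitOn_eq_pvLines (s : List Char) :
    PySem.Chars.splitOn s ['\n'] = pvLines s := by
  rw [PySem.Chars.splitOn, pvGo_spec _ _ _ _ (by omega)]
  cases hrl : pvLines s with
  | nil => exact absurd hrl (pvLines_ne_nil s)
  | cons a as => simp [pvConsHead]

theorem pvLines_no_nl {l : List Char} (h : '\n' ∉ l) : pvLines l = [l] := by
  induction l with
  | nil => simp [pvLines]
  | cons c rest ih =>
    simp only [pvLines]
    rw [if_neg (by intro hc; exact h (by simp [hc]))]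
    rw [ih (by intro hm; exact h (by simp [hm]))]

theorem pvLines_append {l1 l2 : List Char} (h : '\n' ∉ l1) :
    pvLines (l1 ++ '\n' :: l2) = l1 :: pvLines l2 := by
  induction l1 with
  | nil => simp [pvLines]
  | cons c rest ih =>
    simp only [List.cons_append, pvLines]
    rw [if_neg (by intro hc; exact h (by simp [hc]))]
    rw [ih (by intro hm; exact h (by simp [hm]))]

theorem pvBodyOf_ne_nil {cs : List Char} (h : (cs.reverse.dropWhile pvNN) ≠ []) :
    pvBodyOf cs ≠ [] := by
  intro hnil
  have hlast : pvNN ((cs.reverse.dropWhile pvNN).head h) = false :=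
    List.head_dropWhile_not _ h
  have hmem : (cs.reverse.dropWhile pvNN).head h ∈ (cs.reverse.dropWhile pvNN).reverse := by
    simp [List.head_mem]
  have hall : ∀ x ∈ (cs.reverse.dropWhile pvNN).reverse, pvIsWS x = true := by
    rw [pvBodyOf, pvLstripWS] at hnil
    exact List.dropWhile_eq_nil_iff.mp hnil
  have := hall _ hmem
  simp [pvNN, this] at hlast


theorem pvCs_eq (cs : List Char) :
    cs = (cs.reverse.dropWhile pvNN).reverse ++ pvPendOf cs := by
  rw [pvPendOf, ← List.reverse_append, List.takeWhile_append_dropWhile, List.reverse_reverse]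

theorem pvIsWS_of_nn_false {c : Char} (h : pvNN c = false) : pvIsWS c = false := by
  simp [pvNN] at h; exact h.1

theorem pvBody_snoc_normal {cs : List Char} {c : Char} (hnn : pvNN c = false) :
    pvBodyOf (cs ++ [c]) =
      (if pvBodyOf cs ≠ [] then pvBodyOf cs ++ pvPendOf cs else pvLstripWS (pvPendOf cs)) ++ [c] := by
  have hws : pvIsWS c = false := pvIsWS_of_nn_false hnn
  have hlhs : pvBodyOf (cs ++ [c]) = List.dropWhile pvIsWS (cs ++ [c]) := by
    simp [pvBodyOf, pvLstripWS, hnn]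
  by_cases hD : cs.reverse.dropWhile pvNN = []
  · have hcs : cs = pvPendOf cs := by
      conv_lhs => rw [pvCs_eq cs]
      rw [hD]; simp
    have hb : pvBodyOf cs = [] := by simp [pvBodyOf, hD, pvLstripWS]
    rw [hlhs, hb, if_neg (by simp), ← hcs, pvLstripWS, List.dropWhile_append]
    split
    · next hemp =>
        simp [hws]
        simpa using hemp
    · rfl
  · have hb : pvBodyOf cs ≠ [] := pvBodyOf_ne_nil hD
    have hne : (List.dropWhile pvIsWS ((cs.reverse.dropWhile pvNN).reverse)).isEmpty = false := by
      simp [pvBodyOf, pvLstripWS] at hb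
      simpa using hb
    rw [hlhs, if_pos hb]
    conv_lhs => rw [pvCs_eq cs]
    rw [List.append_assoc, List.dropWhile_append, hne]
    simp [pvBodyOf, pvLstripWS]

theorem pvScan {cs : List Char} (h : '\n' ∉ cs) (P : List (List Char)) :
    List.foldl pvStep ⟨[], [], false, P⟩ cs = ⟨pvBodyOf cs, pvPendOf cs, cs.contains '/', P⟩ := by
  induction cs using List.reverseRecOn with
  | nil => simp [pvBodyOf, pvPendOf, pvLstripWS]
  | append_singleton cs c ih =>
    have hc : c ≠ '\n' := by intro hc; exact h (by simp [hc])
    have hcs : '\n' ∉ cs := by intro hm; exact h (by simp [hm])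
    rw [List.foldl_append, ih hcs]
    simp only [List.foldl_cons, List.foldl_nil]
    rw [pvStep, if_neg hc]
    by_cases hnn : pvNN c = true
    · rw [if_pos (by simpa [pvNN] using hnn)]
      have h1 : pvPendOf (cs ++ [c]) = pvPendOf cs ++ [c] := by
        simp [pvPendOf, hnn]
      have h2 : pvBodyOf (cs ++ [c]) = pvBodyOf cs := by
        simp [pvBodyOf, hnn]
      have h3 : (cs ++ [c]).contains '/' = cs.contains '/' := by
        have : c ≠ '/' := by intro hcc; subst hcc; simp [pvNN, pvIsWS, pvWS] at hnn
        simp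
        intro hh; exact absurd hh.symm this
      rw [h1, h2, h3]
    · rw [if_neg (by simpa [pvNN] using hnn)]
      have h2 := pvBody_snoc_normal (cs := cs) (c := c) (by simpa using hnn)
      have h1 : pvPendOf (cs ++ [c]) = [] := by
        simp [pvPendOf, hnn]
      rw [h1, ← h2]
      congr 1
      by_cases hcc : c = '/'
      · simp [hcc]
      · have : ('/' = c) = False := by simp [eq_comm, hcc]
        simp [hcc, this]

theorem pvCharEqNat (c d : Char) : (c == d) = decide (c.toNat = d.toNat) := by
  apply Bool.eq_iff_iff.mpr
  simp only [beq_iff_eq, decide_eq_true_iff]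
  exact ⟨fun h => by subst h; rfl, fun h => Char.ext (UInt32.toNat_inj.mp h)⟩

-- on the domain's line characters (printable ASCII, tab, CR) the scanner's whitespace
-- test agrees with Python's str.strip whitespace class
theorem pvWS_eq_isspace {c : Char} (hd : pvDomChar c = true) (hc : c ≠ '\n') :
    pvIsWS c = PySem.Chars.isspace c := by
  have hn : c.toNat ≠ 10 := by
    intro h; exact hc (Char.ext (UInt32.toNat_inj.mp h))
  simp only [pvDomChar, Bool.or_eq_true, Bool.and_eq_true, decide_eq_true_iff, beq_iff_eq] at hd
  simp only [pvIsWS, pvWS, List.contains_cons, List.contains_nil, pvCharEqNat]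
  simp only [PySem.Chars.isspace]
  apply Bool.eq_iff_iff.mpr
  simp only [Bool.or_eq_true, Bool.and_eq_true, decide_eq_true_iff]
  rw [show (' ').toNat = 32 from rfl, show ('\t').toNat = 9 from rfl,
      show ('\r').toNat = 13 from rfl, show (Char.ofNat 11).toNat = 11 from rfl,
      show (Char.ofNat 12).toNat = 12 from rfl]
  simp only [Bool.false_eq_true, or_false]
  omega

theorem pvDropWhile_congr {p q : Char → Bool} {l : List Char} (h : ∀ x ∈ l, p x = q x) :
    List.dropWhile p l = List.dropWhile q l := by
  induction l with
  | nil => rfl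
  | cons a t ih =>
    simp only [List.dropWhile_cons]
    rw [h a (by simp)]
    split
    · exact ih (fun x hx => h x (by simp [hx]))
    · rfl

-- Python's strip equals the scanner's WS-strip on domain lines
theorem pvStrip_eq {cs : List Char} (h : ∀ x ∈ cs, PySem.Chars.isspace x = pvIsWS x) :
    PySem.Chars.strip cs = pvRstripWS (pvLstripWS cs) := by
  rw [PySem.Chars.strip, PySem.Chars.lstrip, PySem.Chars.rstrip, pvRstripWS, pvLstripWS]
  rw [pvDropWhile_congr h]
  congr 1
  apply pvDropWhile_congr
  intro x hx
  apply h
  have : x ∈ List.dropWhile pvIsWS cs := by simpa using hx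
  exact (List.dropWhile_suffix pvIsWS).subset this

-- right-strip distributes over an append whose left part ends in a non-stripped char

theorem pvRdrop_append (p : Char → Bool) (X Y : List Char)
    (h : ∀ (hx : X ≠ []), p (X.getLast hx) = false) :
    (((X ++ Y).reverse.dropWhile p)).reverse = X ++ ((Y.reverse.dropWhile p)).reverse := by
  rcases eq_or_ne X [] with hX | hX
  · subst hX; simp
  · rw [List.reverse_append, List.dropWhile_append]
    have hx : X.reverse = X.getLast hX :: (X.dropLast).reverse := by
      conv_lhs => rw [← List.dropLast_append_getLast hX]
      simp
    have hdx : List.dropWhile p X.reverse = X.reverse := by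
      rw [hx, List.dropWhile_cons, h hX]
      simp
    split
    · next hemp =>
        rw [hdx]
        have : Y.reverse.dropWhile p = [] := by simpa using hemp
        simp [this]
    · simp
theorem pvLdrop_append (p : Char → Bool) (X Y : List Char)
    (hne : X ≠ []) (h : p (X.head hne) = false) :
    List.dropWhile p (X ++ Y) = X ++ Y := by
  rcases X with _ | ⟨a, t⟩
  · simp at hne
  · simp only [List.head] at h
    simp [h]

-- x.endswith(c) in terms of getLast?
theorem pvEndswith_iff (x : List Char) (c : Char) :
    PySem.Chars.endswith x [c] = (x.getLast? == some c) := by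
  rw [PySem.Chars.endswith]
  apply Bool.eq_iff_iff.mpr
  rw [List.isSuffixOf_iff_suffix]
  constructor
  · rintro ⟨t, rfl⟩
    simp [List.getLast?_append]
  · intro h
    simp only [beq_iff_eq, List.getLast?_eq_some_iff] at h
    obtain ⟨t, rfl⟩ := h
    exact ⟨t, rfl⟩

theorem pvIsIn_singleton (a : Char) (s : List Char) :
    PySem.Chars.isIn [a] s = s.contains a := by
  apply Bool.eq_iff_iff.mpr
  rw [PySem.Chars.isIn_iff_infix, List.singleton_infix_iff]
  simp

theorem pvMem_strip {x : Char} {cs : List Char} (h : x ∈ PySem.Chars.strip cs) : x ∈ cs := by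
  rw [PySem.Chars.strip, PySem.Chars.rstrip, PySem.Chars.lstrip] at h
  simp only [List.mem_reverse] at h
  have h1 := (List.dropWhile_suffix (l := (List.dropWhile PySem.Chars.isspace cs).reverse) PySem.Chars.isspace).subset h
  simp only [List.mem_reverse] at h1
  exact (List.dropWhile_suffix PySem.Chars.isspace).subset h1

theorem pvMem_pendOf {x : Char} {cs : List Char} (h : x ∈ pvPendOf cs) : pvNN x = true := by
  rw [pvPendOf, List.mem_reverse] at h
  exact List.mem_takeWhile_imp h

theorem pvPendOf_subset {x : Char} {cs : List Char} (h : x ∈ pvPendOf cs) : x ∈ cs := by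
  rw [pvPendOf, List.mem_reverse] at h
  have := (List.takeWhile_prefix (l := cs.reverse) pvNN).subset h
  simpa using this

theorem pvBodyOf_subset {x : Char} {cs : List Char} (h : x ∈ pvBodyOf cs) : x ∈ cs := by
  rw [pvBodyOf, pvLstripWS] at h
  have h1 := (List.dropWhile_suffix pvIsWS).subset h
  rw [List.mem_reverse] at h1
  have := (List.dropWhile_suffix pvNN).subset h1
  simpa using this

-- the last char of a nonempty body is neither whitespace nor ';'
theorem pvBodyOf_getLast_nn {cs : List Char} (hD : cs.reverse.dropWhile pvNN ≠ []) :
    ∃ b, (pvBodyOf cs).getLast? = some b ∧ pvNN b = false := by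
  have hb := pvBodyOf_ne_nil hD
  refine ⟨(cs.reverse.dropWhile pvNN).head hD, ?_, List.head_dropWhile_not _ hD⟩
  have hsuf : pvBodyOf cs <:+ (cs.reverse.dropWhile pvNN).reverse := by
    rw [pvBodyOf, pvLstripWS]
    exact List.dropWhile_suffix pvIsWS
  obtain ⟨t, ht⟩ := hsuf
  have : ((cs.reverse.dropWhile pvNN).reverse).getLast? = some ((cs.reverse.dropWhile pvNN).head hD) := by
    rw [List.getLast?_reverse]
    exact List.head?_eq_some_head hD
  rw [← ht, List.getLast?_append_of_ne_nil _ hb] at this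
  exact this

theorem pvLine_eq {cs : List Char} (h : '\n' ∉ cs) (hd : ∀ c ∈ cs, pvDomChar c = true)
    (P : List (List Char)) :
    pvStep ⟨pvBodyOf cs, pvPendOf cs, cs.contains '/', P⟩ '\n' = ⟨[], [], false, P ++ pvEmitA cs⟩ := by
  have hspace : ∀ x ∈ cs, PySem.Chars.isspace x = pvIsWS x := by
    intro x hx
    exact (pvWS_eq_isspace (hd x hx) (by intro hxe; exact h (hxe ▸ hx))).symm
  rw [pvStep, if_pos rfl]
  dsimp only
  congr 1
  by_cases hD : cs.reverse.dropWhile pvNN = []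
  -- no "normal" char in the line: nothing is emitted on either side
  · have hcs : cs = pvPendOf cs := by
      conv_lhs => rw [pvCs_eq cs]; rw [hD]; simp
    have hslash : cs.contains '/' = false := by
      apply Bool.not_eq_true _ |>.mp
      intro hcon
      have hm : '/' ∈ cs := by simpa using hcon
      have := pvMem_pendOf (hcs ▸ hm)
      simp [pvNN, pvIsWS, pvWS] at this
    rw [hslash]
    simp only [Bool.false_eq_true, if_false]
    have hnoslash : PySem.Chars.isIn ['/'] (PySem.Chars.strip cs) = false := by
      rw [pvIsIn_singleton]
      apply Bool.not_eq_true _ |>.mp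
      intro hcon
      have hm : '/' ∈ cs := pvMem_strip (by simpa using hcon)
      rw [List.contains_eq_mem, decide_eq_false_iff_not] at hslash
      exact hslash hm
    rw [pvEmitA]
    simp [hnoslash]
  -- a normal char exists: s = body ++ p2 and both sides emit the same
  · have hb : pvBodyOf cs ≠ [] := pvBodyOf_ne_nil hD
    obtain ⟨bl, hbl, hblnn⟩ := pvBodyOf_getLast_nn hD
    have hblws : pvIsWS bl = false := by simp [pvNN] at hblnn; exact hblnn.1
    have hblsemi : (bl == ';') = false := by simp [pvNN] at hblnn; simpa using hblnn.2
    have hlastB : ∀ (hx : pvBodyOf cs ≠ []), ((pvBodyOf cs).getLast hx) = bl := by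
      intro hx
      have := List.getLast?_eq_some_getLast (l := pvBodyOf cs) hx
      rw [hbl] at this
      exact (Option.some_inj.mp this).symm
    have hheadB : pvIsWS ((pvBodyOf cs).head hb) = false := by
      rw [pvBodyOf, pvLstripWS] at *
      exact List.head_dropWhile_not _ _
    -- s = B ++ P2
    have hs : PySem.Chars.strip cs = pvBodyOf cs ++ pvRstripWS (pvPendOf cs) := by
      rw [pvStrip_eq hspace]
      have hl : pvLstripWS cs = pvBodyOf cs ++ pvPendOf cs := by
        conv_lhs => rw [pvCs_eq cs]
        rw [pvLstripWS, List.dropWhile_append]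
        rw [if_neg (by rw [pvBodyOf, pvLstripWS] at hb; simpa using hb)]
        rw [pvBodyOf, pvLstripWS]
      rw [hl, pvRstripWS, pvRdrop_append pvIsWS _ _ (by intro hx; rw [hlastB hx]; exact hblws)]
      rfl
    -- endswith
    have hend : PySem.Chars.endswith (pvBodyOf cs ++ pvRstripWS (pvPendOf cs)) [';'] =
        PySem.Chars.endswith (pvRstripWS (pvPendOf cs)) [';'] := by
      rw [pvEndswith_iff, pvEndswith_iff, List.getLast?_append]
      cases hp2 : (pvRstripWS (pvPendOf cs)).getLast? with
      | none => simp [hbl, hblsemi]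
      | some d => simp
    -- contains
    have hin : PySem.Chars.isIn ['/'] (pvBodyOf cs ++ pvRstripWS (pvPendOf cs)) = cs.contains '/' := by
      rw [pvIsIn_singleton]
      apply Bool.eq_iff_iff.mpr
      simp only [List.contains_eq_mem, decide_eq_true_iff, List.mem_append]
      constructor
      · rintro (hm | hm)
        · exact pvBodyOf_subset hm
        · apply pvPendOf_subset
          rw [pvRstripWS] at hm
          have := (List.dropWhile_suffix (l := (pvPendOf cs).reverse) pvIsWS).subset (by simpa using hm)
          simpa using this
      · intro hm
        left
        -- '/' is in cs; it cannot be in the pend part (all pvNN) nor in the ws dropped from D'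
        conv at hm => rw [pvCs_eq cs]
        rw [List.mem_append] at hm
        rcases hm with hm | hm
        · rw [pvBodyOf]
          rw [show (cs.reverse.dropWhile pvNN).reverse =
              List.takeWhile pvIsWS ((cs.reverse.dropWhile pvNN).reverse) ++ pvLstripWS ((cs.reverse.dropWhile pvNN).reverse) from (List.takeWhile_append_dropWhile).symm] at hm
          rw [List.mem_append] at hm
          rcases hm with hm | hm
          · have := List.mem_takeWhile_imp hm
            simp [pvIsWS, pvWS] at this
          · exact hm
        · have := pvMem_pendOf hm
          simp [pvNN, pvIsWS, pvWS] at this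
    rw [pvEmitA]
    dsimp only
    rw [hs, hend, hin]
    by_cases hsl : cs.contains '/' = true
    · rw [hsl]
      simp only [if_true, Bool.and_true]
      by_cases he : PySem.Chars.endswith (pvRstripWS (pvPendOf cs)) [';'] = true
      · rw [he]
        simp only [if_true]
        -- the emitted value
        have hval : PySem.Chars.strip (pvRstripSemi (pvBodyOf cs ++ pvRstripWS (pvPendOf cs))) =
            pvBodyOf cs ++ pvRstripWS (pvRstripSemi (pvRstripWS (pvPendOf cs))) := by
          have h1 : pvRstripSemi (pvBodyOf cs ++ pvRstripWS (pvPendOf cs)) =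
              pvBodyOf cs ++ pvRstripSemi (pvRstripWS (pvPendOf cs)) := by
            rw [pvRstripSemi, pvRdrop_append _ _ _ (by intro hx; rw [hlastB hx]; exact hblsemi)]
            rfl
          rw [h1]
          have hmem : ∀ x ∈ pvBodyOf cs ++ pvRstripSemi (pvRstripWS (pvPendOf cs)), PySem.Chars.isspace x = pvIsWS x := by
            intro x hx
            rw [List.mem_append] at hx
            apply hspace
            rcases hx with hx | hx
            · exact pvBodyOf_subset hx
            · apply pvPendOf_subset
              rw [pvRstripSemi] at hx
              have h2 := (List.dropWhile_suffix (l := (pvRstripWS (pvPendOf cs)).reverse) (· == ';')).subset (by simpa using hx)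
              simp only [pvRstripWS, List.mem_reverse] at h2
              have h3 := (List.dropWhile_suffix (l := (pvPendOf cs).reverse) pvIsWS).subset h2
              simpa using h3
          rw [pvStrip_eq hmem, pvLstripWS,
              pvLdrop_append pvIsWS _ _ hb hheadB, pvRstripWS,
              pvRdrop_append pvIsWS _ _ (by intro hx; rw [hlastB hx]; exact hblws)]
          rfl
        rw [hval]
        rw [if_pos (by simp [hb])]
      · rw [Bool.not_eq_true] at he
        rw [he]
        simp
    · rw [Bool.not_eq_true] at hsl
      rw [hsl]
      simp

theorem pvMain (l : List Char) (hd : ∀ c ∈ l, pvDomChar c = true) (P : List (List Char)) :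
    List.foldl pvStep ⟨[], [], false, P⟩ (l ++ ['\n']) =
      ⟨[], [], false, P ++ (pvLines l).flatMap pvEmitA⟩ := by
  induction hn : l.length using Nat.strong_induction_on generalizing l P with
  | _ n ih =>
  by_cases hnl : '\n' ∈ l
  · obtain ⟨l1, l2, rfl, hl1⟩ := List.eq_append_cons_of_mem hnl
    have hd1 : ∀ c ∈ l1, pvDomChar c = true := fun c hc => hd c (by simp [hc])
    have hd2 : ∀ c ∈ l2, pvDomChar c = true := fun c hc => hd c (by simp [hc])
    have hline : List.foldl pvStep ⟨[], [], false, P⟩ (l1 ++ ['\n']) = ⟨[], [], false, P ++ pvEmitA l1⟩ := by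
      rw [List.foldl_append, pvScan hl1, List.foldl_cons, List.foldl_nil, pvLine_eq hl1 hd1]
    have hstep1 : List.foldl pvStep ⟨[], [], false, P⟩ ((l1 ++ '\n' :: l2) ++ ['\n']) =
        List.foldl pvStep (List.foldl pvStep ⟨[], [], false, P⟩ (l1 ++ ['\n'])) (l2 ++ ['\n']) := by
      rw [← List.foldl_append]
      congr 1
      simp
    rw [hstep1, hline, ih l2.length (by subst hn; simp; omega) l2 hd2 (P ++ pvEmitA l1) rfl,
        pvLines_append hl1]
    simp [List.flatMap_cons, List.append_assoc]
  · rw [List.foldl_append, pvScan hnl, List.foldl_cons, List.foldl_nil, pvLine_eq hnl hd,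
        pvLines_no_nl hnl]
    simp

theorem pvFoldA (lines : List (List Char)) (acc : List (List Char)) :
    lines.foldl (fun (prefixes : List (List Char)) line =>
      let line := PySem.Chars.strip line
      if PySem.Chars.endswith line [';'] && PySem.Chars.isIn ['/'] line then
        let pfx := PySem.Chars.strip (pvRstripSemi line)
        if pfx ≠ [] then prefixes ++ [pfx] else prefixes
      else prefixes) acc = acc ++ lines.flatMap pvEmitA := by
  have hfun : (fun (prefixes : List (List Char)) line =>
      let line := PySem.Chars.strip line
      if PySem.Chars.endswith line [';'] && PySem.Chars.isIn ['/'] line then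
        let pfx := PySem.Chars.strip (pvRstripSemi line)
        if pfx ≠ [] then prefixes ++ [pfx] else prefixes
      else prefixes) = (fun acc x => acc ++ pvEmitA x) := by
    funext acc cs
    rw [pvEmitA]
    dsimp only
    split
    · split
      · rfl
      · simp
    · simp
  rw [hfun, PySem.List.foldl_append_eq_flatMap]

-- ===== VERDICT (by name: the statement is the Claim_ definition above) =====
theorem parse_juniper_prefix_list_py_spec : Claim_equal_parse_juniper_prefix_list_py := by
  intro output hdom
  unfold Spec_parse_juniper_prefix_list_py
  have hd : ∀ c ∈ output.toList, pvDomChar c = true := by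
    have : pvDomStr output = true := hdom
    rw [pvDomStr, List.all_eq_true] at this
    simpa using this
  rw [parse_juniper_prefix_list_py, parse_juniper_prefix_list_py_alt]
  rw [splitOn_eq_pvLines, pvFoldA, pvMain output.toList hd []]
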